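-- pv_equiv track=rewrite | github.com/lbaf23/assertagents | utils/python_utils/python_file_utils.py | remove_python_preview_imports
-- ===== SOURCE A (Python) =====
-- def remove_python_preview_imports(code: str, preview_with_lineno: bool = True) -> str:
--     lines = code.splitlines()
--     j = 0
--     while j < len(lines):
--         if preview_with_lineno:
--             line = lines[j][lines[j].index(']') + 1 : ].lstrip()
--         else:
--             line = lines[j].lstrip()
--
--         if line.startswith('from') or line.startswith('import'):
--             while True:
--                 if preview_with_lineno:
--                     line = lines[j][lines[j].index(']') + 1:].lstrip()
--                 else:
--                     line = lines[j].lstrip()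
--
--                 if line.startswith('from') or line.startswith('import') or line.strip() == '':
--                     j += 1
--                 else:
--                     break
--             break
--         elif line == '':
--             j += 1
--         else:
--             break
--     if j > 0:
--         lines = lines[j : ]
--     return '\n'.join(lines)
-- ===== SOURCE B (Python) =====
-- def remove_python_preview_imports(code: str, preview_with_lineno: bool = True) -> str:
--     # builds the answer back-to-front: walking the lines in reverse it maintains the joined
--     # suffix, and remembers it whenever the line is real code; the last remembered suffix
--     # (i.e. the one from the earliest code line) is the result
--     res = ''
--     acc = None
--     for line in reversed(code.splitlines()):
--         acc = line if acc is None else line + '\n' + acc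
--         content = (line[line.find(']') + 1:] if preview_with_lineno else line).lstrip()
--         if content and not content.startswith(('from', 'import')):
--             res = acc
--     return res
-- ===== Notes on version B (the rewrite author's own statement) =====
-- stated objective: alternative
-- what changed: Replaces A's forward nested while-loops that compute a skip count and then slice-and-join by a single reverse traversal that builds the joined suffix string back-to-front and remembers it whenever it meets a real code line.
-- crash fix: A raises ValueError when the scan of leading blank/import lines meets a line without ']' while preview_with_lineno is set, and IndexError when every line is blank/import with at least one import; B returns a value in both cases (treating a ']'-less line's whole text as its content, and '' when every line is droppable). — e.g. on remove_python_preview_imports("import os", false): A raises IndexError, B returns ""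
import Mathlib
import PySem

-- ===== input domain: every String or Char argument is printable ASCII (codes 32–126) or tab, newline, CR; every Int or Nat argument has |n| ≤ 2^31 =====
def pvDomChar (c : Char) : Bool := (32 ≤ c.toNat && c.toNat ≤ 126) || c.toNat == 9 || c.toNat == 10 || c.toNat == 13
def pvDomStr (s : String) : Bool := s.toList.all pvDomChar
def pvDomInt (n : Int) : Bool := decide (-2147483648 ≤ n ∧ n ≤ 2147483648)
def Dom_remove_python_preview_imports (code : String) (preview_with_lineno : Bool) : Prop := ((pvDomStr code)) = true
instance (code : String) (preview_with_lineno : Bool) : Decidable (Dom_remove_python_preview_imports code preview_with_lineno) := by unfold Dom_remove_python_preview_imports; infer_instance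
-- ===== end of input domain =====

-- B replaces A's forward nested while-loops (skip count, slice, join) by a single reverse
-- traversal that accumulates the joined suffix string directly and remembers it at each real
-- code line (objective: alternative).  Equivalence is about the return value; no mutation.

-- ===== PORT A =====
-- A's line content: lines[j][lines[j].index(']') + 1:].lstrip() or lines[j].lstrip().
-- Python's .index raises on a line without ']' (Pre_ excludes those inputs where A reads such a
-- line); the port takes find's -1 default there.
def pvContent (flag : Bool) (line : String) : String :=
  if flag then
    PySem.Str.lstrip (PySem.Str.slice line (some (PySem.Str.find line "]" + 1)) none)
  else
    PySem.Str.lstrip line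

-- A's inner 'while True' loop (drains import/blank lines; the port returns the count dropped;
-- Python raises IndexError at the end of the list, which Pre_ excludes — the port returns there)
def pvAInner (flag : Bool) : List String → Nat
  | [] => 0
  | l :: rest =>
    let line := pvContent flag l
    if PySem.Str.startswith line "from" || PySem.Str.startswith line "import"
        || (PySem.Str.strip line == "") then
      1 + pvAInner flag rest
    else 0

-- A's outer 'while j < len(lines)' loop, as the count of lines it skips
def pvAOuter (flag : Bool) : List String → Nat
  | [] => 0
  | l :: rest =>
    let line := pvContent flag l
    if PySem.Str.startswith line "from" || PySem.Str.startswith line "import" then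
      pvAInner flag (l :: rest)
    else if line == "" then
      1 + pvAOuter flag rest
    else 0

def remove_python_preview_imports (code : String) (preview_with_lineno : Bool) : String :=
  let lines := PySem.Str.splitlines code
  let j := pvAOuter preview_with_lineno lines
  let lines := if j > 0 then PySem.List.slice lines (some (j : Int)) none else lines
  PySem.Str.join "\n" lines

-- ===== PORT B =====
-- B's line content: (line[line.find(']') + 1:] if flag else line).lstrip()
def pvBContent (flag : Bool) (line : String) : String :=
  PySem.Str.lstrip
    (if flag then PySem.Str.slice line (some (PySem.Str.find line "]" + 1)) none else line)

-- B's loop-body test: 'content and not content.startswith(('from', 'import'))'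
def pvBKeep (flag : Bool) (line : String) : Bool :=
  let content := pvBContent flag line
  (!(content == "")) &&
    !(PySem.Str.startswith content "from" || PySem.Str.startswith content "import")

-- one iteration of B's 'for line in reversed(...)' loop; state = (res, acc)
def pvBStep (flag : Bool) (st : String × Option String) (line : String) : String × Option String :=
  let acc := match st.2 with
    | none => line
    | some a => line ++ "\n" ++ a
  if pvBKeep flag line then (acc, some acc) else (st.1, some acc)

def remove_python_preview_imports_alt (code : String) (preview_with_lineno : Bool) : String :=
  (((PySem.Str.splitlines code).reverse).foldl (pvBStep preview_with_lineno) ("", none)).1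

-- ===== PRECONDITION & SPEC =====
-- predicates Pre_ is phrased with (on one line of the split code)
def pvGood (flag : Bool) (l : String) : Bool := !flag || PySem.Str.isIn "]" l
def pvDroppable (flag : Bool) (l : String) : Bool :=
  let c := pvBContent flag l
  (c == "") || PySem.Str.startswith c "from" || PySem.Str.startswith c "import"
def pvImportish (flag : Bool) (l : String) : Bool :=
  let c := pvBContent flag l
  PySem.Str.startswith c "from" || PySem.Str.startswith c "import"

-- Pre_ excludes exactly the inputs on which the Python A raises: a ValueError when the scan of
-- leading blank/import lines reaches a line without ']' while preview_with_lineno is set, and an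
-- IndexError when every line is blank/import and at least one is an import (the inner loop runs
-- off the end of the list); A returns normally on every other input.
def Pre_remove_python_preview_imports (code : String) (preview_with_lineno : Bool) : Prop :=
  let ls := PySem.Str.splitlines code
  (∀ j < ls.length,
      (∀ i < j, pvGood preview_with_lineno (ls.getD i "") = true ∧
                pvDroppable preview_with_lineno (ls.getD i "") = true) →
      pvGood preview_with_lineno (ls.getD j "") = true) ∧
  ¬ ((∀ i < ls.length, pvGood preview_with_lineno (ls.getD i "") = true ∧
                       pvDroppable preview_with_lineno (ls.getD i "") = true) ∧
     ∃ i < ls.length, pvImportish preview_with_lineno (ls.getD i "") = true)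

instance (code : String) (preview_with_lineno : Bool) : Decidable (Pre_remove_python_preview_imports code preview_with_lineno) := by
  unfold Pre_remove_python_preview_imports; infer_instance

def pvWitness_remove_python_preview_imports : String × Bool := ("[1] import os\n[2] x = 1", true)

-- On inputs where the leading blank/import scan meets a ']'-less line (preview_with_lineno set)
-- A raises ValueError, and where every line is blank/import with at least one import A's inner
-- loop indexes past the end and raises IndexError; B returns a value in both cases (treating a
-- ']'-less line's whole text as its content, and '' when every line is droppable).
def Raises_remove_python_preview_imports (code : String) (preview_with_lineno : Bool) : Prop :=
  let ls := PySem.Str.splitlines code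
  (∃ j < ls.length,
      (∀ i < j, pvGood preview_with_lineno (ls.getD i "") = true ∧
                pvDroppable preview_with_lineno (ls.getD i "") = true) ∧
      pvGood preview_with_lineno (ls.getD j "") = false) ∨
  ((∀ i < ls.length, pvGood preview_with_lineno (ls.getD i "") = true ∧
                     pvDroppable preview_with_lineno (ls.getD i "") = true) ∧
   ∃ i < ls.length, pvImportish preview_with_lineno (ls.getD i "") = true)

instance (code : String) (preview_with_lineno : Bool) : Decidable (Raises_remove_python_preview_imports code preview_with_lineno) := by
  unfold Raises_remove_python_preview_imports; infer_instance

def pvRaiseWitness_remove_python_preview_imports : String × Bool := ("import os", false)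
def pvRaiseWitnessOut_remove_python_preview_imports : String := ""

def Spec_remove_python_preview_imports (code : String) (preview_with_lineno : Bool) (out : String) : Prop := out = remove_python_preview_imports_alt code preview_with_lineno
instance (code : String) (preview_with_lineno : Bool) (out : String) : Decidable (Spec_remove_python_preview_imports code preview_with_lineno out) := by unfold Spec_remove_python_preview_imports; infer_instance

-- ===== CLAIM (what is proved, stated in full; the proofs are below) =====
def Claim_equal_remove_python_preview_imports : Prop := ∀ (code : String) (preview_with_lineno : Bool), Dom_remove_python_preview_imports code preview_with_lineno → Pre_remove_python_preview_imports code preview_with_lineno → Spec_remove_python_preview_imports code preview_with_lineno (remove_python_preview_imports code preview_with_lineno)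

def Claim_raises_remove_python_preview_imports : Prop := (∀ (code : String) (preview_with_lineno : Bool), Dom_remove_python_preview_imports code preview_with_lineno → Raises_remove_python_preview_imports code preview_with_lineno → ¬ Pre_remove_python_preview_imports code preview_with_lineno) ∧ (Dom_remove_python_preview_imports (pvRaiseWitness_remove_python_preview_imports.1) (pvRaiseWitness_remove_python_preview_imports.2) ∧ Raises_remove_python_preview_imports (pvRaiseWitness_remove_python_preview_imports.1) (pvRaiseWitness_remove_python_preview_imports.2) ∧ remove_python_preview_imports_alt (pvRaiseWitness_remove_python_preview_imports.1) (pvRaiseWitness_remove_python_preview_imports.2) = pvRaiseWitnessOut_remove_python_preview_imports)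

-- ===== LEMMAS AND PROOFS =====

-- A's and B's content expressions compute the same string
lemma pv_content_eq (flag : Bool) (l : String) : pvContent flag l = pvBContent flag l := by
  cases flag <;> simp [pvContent, pvBContent]

-- stripping a string that is already left-stripped gives [] iff it is already []
lemma pv_strip_lstrip_nil (l : List Char) :
    (PySem.Chars.strip (PySem.Chars.lstrip l) = []) ↔ (PySem.Chars.lstrip l = []) := by
  induction l with
  | nil => simp [PySem.Chars.strip, PySem.Chars.lstrip, PySem.Chars.rstrip]
  | cons c t ih =>
    by_cases h : PySem.Chars.isspace c = true
    · simpa [PySem.Chars.lstrip, List.dropWhile_cons, h] using ih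
    · simp [PySem.Chars.strip, PySem.Chars.lstrip, PySem.Chars.rstrip,
        h, List.dropWhile_eq_nil_iff]
      exact ⟨c, Or.inr rfl, by simpa using h⟩

lemma pv_str_strip_content (flag : Bool) (l : String) :
    (PySem.Str.strip (pvBContent flag l) == "") = (pvBContent flag l == "") := by
  have key : ∀ s : String,
      (PySem.Str.strip (PySem.Str.lstrip s) == "") = (PySem.Str.lstrip s == "") := by
    intro s
    have h := pv_strip_lstrip_nil s.toList
    have hb : (PySem.Str.strip (PySem.Str.lstrip s)).toList
        = PySem.Chars.strip (PySem.Chars.lstrip s.toList) := by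
      simp
    apply Bool.eq_iff_iff.mpr
    simp only [beq_iff_eq]
    constructor
    · intro hx
      have : (PySem.Str.lstrip s).toList = [] := by
        simp [← h.mp (by rw [← hb, hx]; simp)]
      cases hy : PySem.Str.lstrip s
      · simpa [hy] using this
    · intro hx
      rw [hx]
      simp [PySem.Str.strip, PySem.Chars.strip, PySem.Chars.lstrip, PySem.Chars.rstrip]
  cases flag
  · exact key l
  · exact key (PySem.Str.slice l (some (PySem.Str.find l "]" + 1)) none)

lemma pv_akeep (flag : Bool) (l : String) :
    (PySem.Str.startswith (pvContent flag l) "from" || PySem.Str.startswith (pvContent flag l) "import"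
      || (PySem.Str.strip (pvContent flag l) == "")) = !pvBKeep flag l := by
  rw [pv_content_eq, pv_str_strip_content]
  simp only [pvBKeep]
  generalize PySem.Str.startswith (pvBContent flag l) "from" = f
  generalize PySem.Str.startswith (pvBContent flag l) "import" = i
  generalize (pvBContent flag l == "") = s
  cases f <;> cases i <;> cases s <;> rfl

-- the number of leading lines B's condition rejects (used only to state the two loop lemmas)
def pvBDrop (flag : Bool) : List String → Nat
  | [] => 0
  | l :: rest => if pvBKeep flag l then 0 else 1 + pvBDrop flag rest

lemma pv_inner_eq_bdrop (flag : Bool) (ls : List String) :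
    pvAInner flag ls = pvBDrop flag ls := by
  induction ls with
  | nil => rfl
  | cons l rest ih =>
    simp only [pvAInner, pvBDrop, pv_akeep, ih]
    cases pvBKeep flag l <;> rfl

lemma pv_outer_eq_bdrop (flag : Bool) (ls : List String) :
    pvAOuter flag ls = pvBDrop flag ls := by
  induction ls with
  | nil => rfl
  | cons l rest ih =>
    have hin := pv_inner_eq_bdrop flag (l :: rest)
    simp only [pvBDrop, pvBKeep] at hin
    simp only [pvAOuter, pvBDrop, pvBKeep, pv_content_eq]
    rcases Bool.eq_false_or_eq_true (PySem.Str.startswith (pvBContent flag l) "from") with hf | hf <;>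
      rcases Bool.eq_false_or_eq_true (PySem.Str.startswith (pvBContent flag l) "import") with hi | hi <;>
      rcases Bool.eq_false_or_eq_true (pvBContent flag l == "") with hb | hb <;>
      simp_all

-- '\n'.join of a nonempty cons, on the String side
lemma pv_join_cons (l : String) (r : String) (rs : List String) :
    PySem.Str.join "\n" (l :: r :: rs) = l ++ "\n" ++ PySem.Str.join "\n" (r :: rs) := by
  apply String.toList_injective
  simp [PySem.Str.toList_join, PySem.Chars.join_cons_cons]

lemma pv_join_singleton (l : String) : PySem.Str.join "\n" [l] = l := by
  apply String.toList_injective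
  simp [PySem.Str.toList_join, PySem.Chars.join, List.intercalate]

-- B's reverse fold computes ('\n'-join of the suffix past the leading rejected lines,
-- and the '\n'-join of all lines as the accumulator)
lemma pv_fold_spec (flag : Bool) (ls : List String) :
    (ls.reverse).foldl (pvBStep flag) ("", none)
      = (PySem.Str.join "\n" (List.drop (pvBDrop flag ls) ls),
         match ls with | [] => none | _ :: _ => some (PySem.Str.join "\n" ls)) := by
  rw [List.foldl_reverse]
  induction ls with
  | nil => rfl
  | cons l rest ih =>
    rw [List.foldr_cons, ih]
    have hacc : (match (match rest with | [] => none | _ :: _ => some (PySem.Str.join "\n" rest)) with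
        | none => l
        | some a => l ++ "\n" ++ a) = PySem.Str.join "\n" (l :: rest) := by
      cases rest with
      | nil => simp [pv_join_singleton]
      | cons r rs => simp [pv_join_cons]
    by_cases hk : pvBKeep flag l = true
    · simp [pvBStep, hk, hacc, pvBDrop]
    · simp only [pvBStep, hacc, Bool.not_eq_true] at *
      simp [hk, pvBDrop, Nat.add_comm, List.drop_succ_cons]

-- ===== VERDICT (by name: the statement is the Claim_ definition above) =====
theorem remove_python_preview_imports_spec : Claim_equal_remove_python_preview_imports := by
  intro code flag _ _
  unfold Spec_remove_python_preview_imports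
  unfold remove_python_preview_imports remove_python_preview_imports_alt
  rw [pv_fold_spec]
  simp only [pv_outer_eq_bdrop]
  set ls := PySem.Str.splitlines code
  set k := pvBDrop flag ls
  by_cases hk : k > 0
  · simp [hk, PySem.List.slice_from_natCast]
  · simp [Nat.eq_zero_of_not_pos hk]

theorem remove_python_preview_imports_raises : Claim_raises_remove_python_preview_imports := by
  unfold Claim_raises_remove_python_preview_imports
  refine ⟨?_, by decide⟩
  intro code flag _ hr hp
  rcases hr with ⟨j, hj, hpre, hbad⟩ | h2
  · have hgood := hp.1 j hj hpre
    rw [hgood] at hbad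
    cases hbad
  · exact hp.2 h2

-- corollary at the witness: the crash input really is excluded by Pre_
theorem pv_raises_witness_ok :
    ¬ Pre_remove_python_preview_imports (pvRaiseWitness_remove_python_preview_imports.1)
        (pvRaiseWitness_remove_python_preview_imports.2) :=
  remove_python_preview_imports_raises.1 _ _ (by decide) (by decide)
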